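-- pv_equiv track=rewrite | github.com/lx-0/pixel-realm | scripts/gen_leaderboard_assets.py | gen_trophy
-- ===== SOURCE A (Python) =====
-- _ = (0, 0, 0, 0)          # transparent
--
-- K   = (13,  13,  13,  255)  # shadow black / outline
--
-- def blank(w, h, fill=_):
--     return [[fill] * w for _ in range(h)]
--
-- def set_pixel(grid, x, y, color):
--     if 0 <= y < len(grid) and 0 <= x < len(grid[0]):
--         grid[y][x] = color
--
-- def draw_rect(grid, x, y, w, h, color):
--     for ry in range(y, min(y + h, len(grid))):
--         for rx in range(x, min(x + w, len(grid[0]))):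
--             grid[ry][rx] = color
--
-- def draw_line_h(grid, x, y, length, color):
--     for i in range(length):
--         set_pixel(grid, x + i, y, color)
--
-- def gen_trophy(body_dark, body_mid, body_light, accent):
--     """32×32 trophy cup icon."""
--     g = blank(32, 32)
--     cx = 15
--
--     # Cup rim
--     draw_rect(g, cx - 7, 4, 15, 2, body_light)
--     draw_line_h(g, cx - 7, 3, 15, body_mid)
--
--     # Cup body (tapers down)
--     for dy in range(0, 12):
--         taper = dy // 3
--         left = cx - 6 + taper
--         width = 13 - taper * 2
--         if width < 3:
--             width = 3
--             left = cx - 1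
--         draw_line_h(g, left, 6 + dy, width, body_mid)
--     # Body highlights
--     for dy in range(0, 10):
--         taper = dy // 3
--         set_pixel(g, cx - 5 + taper, 6 + dy, body_light)
--
--     # Cup handles
--     for dy in range(0, 5):
--         set_pixel(g, cx - 8, 6 + dy, body_dark)
--         set_pixel(g, cx - 9, 7 + dy, body_dark)
--         set_pixel(g, cx + 8, 6 + dy, body_dark)
--         set_pixel(g, cx + 9, 7 + dy, body_dark)
--     set_pixel(g, cx - 8, 11, body_dark)
--     set_pixel(g, cx + 8, 11, body_dark)
--
--     # Stem
--     draw_rect(g, cx - 1, 18, 3, 4, body_dark)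
--     set_pixel(g, cx, 18, body_mid)
--     set_pixel(g, cx, 19, body_mid)
--
--     # Base
--     draw_rect(g, cx - 5, 22, 11, 2, body_dark)
--     draw_line_h(g, cx - 5, 22, 11, body_mid)
--     draw_rect(g, cx - 6, 24, 13, 2, body_dark)
--     draw_line_h(g, cx - 6, 24, 13, body_mid)
--
--     # Star accent on cup face
--     set_pixel(g, cx, 9, accent)
--     set_pixel(g, cx - 1, 10, accent)
--     set_pixel(g, cx + 1, 10, accent)
--     set_pixel(g, cx, 11, accent)
--
--     # Outline
--     # Top rim outline
--     draw_line_h(g, cx - 8, 2, 17, K)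
--     set_pixel(g, cx - 8, 3, K)
--     set_pixel(g, cx + 8, 3, K)
--     set_pixel(g, cx - 8, 4, K)
--     set_pixel(g, cx + 8, 4, K)
--     set_pixel(g, cx - 8, 5, K)
--     set_pixel(g, cx + 8, 5, K)
--     # Handle outlines
--     set_pixel(g, cx - 10, 7, K)
--     set_pixel(g, cx - 10, 8, K)
--     set_pixel(g, cx - 10, 9, K)
--     set_pixel(g, cx - 10, 10, K)
--     set_pixel(g, cx - 10, 11, K)
--     set_pixel(g, cx + 10, 7, K)
--     set_pixel(g, cx + 10, 8, K)
--     set_pixel(g, cx + 10, 9, K)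
--     set_pixel(g, cx + 10, 10, K)
--     set_pixel(g, cx + 10, 11, K)
--     # Base outline
--     draw_line_h(g, cx - 7, 26, 15, K)
--
--     return g
-- ===== SOURCE B (Python) =====
-- TROPHY = [
--     "................................",
--     "................................",
--     ".......KKKKKKKKKKKKKKKKK........",
--     ".......KMMMMMMMMMMMMMMMK........",
--     ".......KLLLLLLLLLLLLLLLK........",
--     ".......KLLLLLLLLLLLLLLLK........",
--     ".......D.MLMMMMMMMMMMM.D........",
--     ".....KDD.MLMMMMMMMMMMM.DDK......",
--     ".....KDD.MLMMMMMMMMMMM.DDK......",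
--     ".....KDD..MLMMMAMMMMM..DDK......",
--     ".....KDD..MLMMAMAMMMM..DDK......",
--     ".....KDD..MLMMMAMMMMM..DDK......",
--     "...........MLMMMMMMM............",
--     "...........MLMMMMMMM............",
--     "...........MLMMMMMMM............",
--     "............MLMMMMM.............",
--     "............MMMMMMM.............",
--     "............MMMMMMM.............",
--     "..............DMD...............",
--     "..............DMD...............",
--     "..............DDD...............",
--     "..............DDD...............",
--     "..........MMMMMMMMMMM...........",
--     "..........DDDDDDDDDDD...........",
--     ".........MMMMMMMMMMMMM..........",
--     ".........DDDDDDDDDDDDD..........",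
--     "........KKKKKKKKKKKKKKK.........",
--     "................................",
--     "................................",
--     "................................",
--     "................................",
--     "................................",
-- ]
--
-- def gen_trophy(body_dark, body_mid, body_light, accent):
--     """32x32 trophy cup icon, from a pixel-art template."""
--     palette = {
--         ".": (0, 0, 0, 0),
--         "D": body_dark,
--         "M": body_mid,
--         "L": body_light,
--         "A": accent,
--         "K": (13, 13, 13, 255),
--     }
--     return [[palette[ch] for ch in row] for row in TROPHY]
-- ===== Notes on version B (the rewrite author's own statement) =====
-- stated objective: idiomatic
-- what changed: B replaces A's ~30 imperative drawing calls (rects, lines, per-pixel loops that overwrite each other) by a declarative 32-line pixel-art template string mapped through a palette dict built from the four colour parameters.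
import Mathlib
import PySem

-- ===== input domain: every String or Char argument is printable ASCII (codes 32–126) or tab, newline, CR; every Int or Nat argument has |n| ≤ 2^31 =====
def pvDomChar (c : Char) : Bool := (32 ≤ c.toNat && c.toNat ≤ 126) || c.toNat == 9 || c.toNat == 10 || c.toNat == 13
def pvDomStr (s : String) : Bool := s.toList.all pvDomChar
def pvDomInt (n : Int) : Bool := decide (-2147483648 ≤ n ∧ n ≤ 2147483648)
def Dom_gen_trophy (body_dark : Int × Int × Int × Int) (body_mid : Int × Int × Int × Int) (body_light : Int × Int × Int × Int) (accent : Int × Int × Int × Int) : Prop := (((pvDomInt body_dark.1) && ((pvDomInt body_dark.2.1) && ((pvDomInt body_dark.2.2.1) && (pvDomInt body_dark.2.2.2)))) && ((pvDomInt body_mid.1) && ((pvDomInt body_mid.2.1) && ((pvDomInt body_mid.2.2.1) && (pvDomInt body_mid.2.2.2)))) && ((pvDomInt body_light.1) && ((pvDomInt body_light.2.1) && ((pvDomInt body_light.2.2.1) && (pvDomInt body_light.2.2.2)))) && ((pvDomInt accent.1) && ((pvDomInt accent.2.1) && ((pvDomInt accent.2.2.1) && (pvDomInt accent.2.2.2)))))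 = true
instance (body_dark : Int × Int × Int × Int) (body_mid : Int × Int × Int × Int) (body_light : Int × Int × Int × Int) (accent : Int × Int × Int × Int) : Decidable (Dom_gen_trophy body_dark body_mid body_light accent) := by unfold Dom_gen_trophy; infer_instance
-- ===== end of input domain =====

-- B replaces A's sequence of drawing calls by a 32-line pixel-art template mapped through a
-- palette (objective: idiomatic/data-driven; same cost).

-- ===== PORT A =====
-- The drawing helpers are colour-generic (Python is untyped); gen_trophy instantiates them at
-- Int × Int × Int × Int.

-- transparent fill and outline colour, as in the Python module
def pvTransparent : Int × Int × Int × Int := (0, 0, 0, 0)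
def pvKColor : Int × Int × Int × Int := (13, 13, 13, 255)

-- blank(w, h): [[fill] * w for _ in range(h)]  (exact: w = h = 32 ≥ 0 at the call site)
def pvBlank {α : Type} (w h : Int) (fill : α) : List (List α) :=
  (PySem.List.pyRange 0 h 1).map (fun _ => List.replicate w.toNat fill)

-- the raw assignment grid[y][x] = color (exact: every call site has 0 ≤ x, y inside the bounds)
def pvAssign {α : Type} (g : List (List α)) (x y : Int) (c : α) : List (List α) :=
  g.modify y.toNat (fun row => row.set x.toNat c)

-- set_pixel (Python reads len(grid[0]); ported as headD [] — exact: the grid is never empty)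
def pvSetPixel {α : Type} (g : List (List α)) (x y : Int) (c : α) : List (List α) :=
  if 0 ≤ y ∧ y < (g.length : Int) ∧ 0 ≤ x ∧ x < ((g.headD []).length : Int) then
    pvAssign g x y c
  else g

-- draw_rect (the inner range bound re-reads the current grid's width, like Python does)
def pvDrawRect {α : Type} (g : List (List α)) (x y w h : Int) (c : α) : List (List α) :=
  (PySem.List.pyRange y (min (y + h) (g.length : Int)) 1).foldl
    (fun g ry =>
      (PySem.List.pyRange x (min (x + w) ((g.headD []).length : Int)) 1).foldl
        (fun g rx => pvAssign g rx ry c) g)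
    g

-- draw_line_h
def pvDrawLineH {α : Type} (g : List (List α)) (x y len_ : Int) (c : α) : List (List α) :=
  (PySem.List.pyRange 0 len_ 1).foldl (fun g i => pvSetPixel g (x + i) y c) g

-- the '# Cup body (tapers down)' loop
def pvCupBody {α : Type} (cx : Int) (body_mid : α) (g : List (List α)) : List (List α) :=
  (PySem.List.pyRange 0 12 1).foldl (fun g dy =>
    let taper := PySem.Int.floordiv dy 3
    let left := cx - 6 + taper
    let width := 13 - taper * 2
    let (width, left) := if width < 3 then ((3 : Int), cx - 1) else (width, left)
    pvDrawLineH g left (6 + dy) width body_mid) g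

-- the '# Body highlights' loop
def pvHighlights {α : Type} (cx : Int) (body_light : α) (g : List (List α)) : List (List α) :=
  (PySem.List.pyRange 0 10 1).foldl (fun g dy =>
    let taper := PySem.Int.floordiv dy 3
    pvSetPixel g (cx - 5 + taper) (6 + dy) body_light) g

-- the '# Cup handles' loop
def pvHandles {α : Type} (cx : Int) (body_dark : α) (g : List (List α)) : List (List α) :=
  (PySem.List.pyRange 0 5 1).foldl (fun g dy =>
    let g := pvSetPixel g (cx - 8) (6 + dy) body_dark
    let g := pvSetPixel g (cx - 9) (7 + dy) body_dark
    let g := pvSetPixel g (cx + 8) (6 + dy) body_dark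
    pvSetPixel g (cx + 9) (7 + dy) body_dark) g

-- the body of Python's gen_trophy, generic in the colour type
def pvTrophyA {α : Type} (t k body_dark body_mid body_light accent : α) : List (List α) :=
  let g := pvBlank 32 32 t
  let cx : Int := 15
  -- Cup rim
  let g := pvDrawRect g (cx - 7) 4 15 2 body_light
  let g := pvDrawLineH g (cx - 7) 3 15 body_mid
  let g := pvCupBody cx body_mid g
  let g := pvHighlights cx body_light g
  let g := pvHandles cx body_dark g
  let g := pvSetPixel g (cx - 8) 11 body_dark
  let g := pvSetPixel g (cx + 8) 11 body_dark
  -- Stem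
  let g := pvDrawRect g (cx - 1) 18 3 4 body_dark
  let g := pvSetPixel g cx 18 body_mid
  let g := pvSetPixel g cx 19 body_mid
  -- Base
  let g := pvDrawRect g (cx - 5) 22 11 2 body_dark
  let g := pvDrawLineH g (cx - 5) 22 11 body_mid
  let g := pvDrawRect g (cx - 6) 24 13 2 body_dark
  let g := pvDrawLineH g (cx - 6) 24 13 body_mid
  -- Star accent on cup face
  let g := pvSetPixel g cx 9 accent
  let g := pvSetPixel g (cx - 1) 10 accent
  let g := pvSetPixel g (cx + 1) 10 accent
  let g := pvSetPixel g cx 11 accent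
  -- Outline: top rim
  let g := pvDrawLineH g (cx - 8) 2 17 k
  let g := pvSetPixel g (cx - 8) 3 k
  let g := pvSetPixel g (cx + 8) 3 k
  let g := pvSetPixel g (cx - 8) 4 k
  let g := pvSetPixel g (cx + 8) 4 k
  let g := pvSetPixel g (cx - 8) 5 k
  let g := pvSetPixel g (cx + 8) 5 k
  -- Handle outlines
  let g := pvSetPixel g (cx - 10) 7 k
  let g := pvSetPixel g (cx - 10) 8 k
  let g := pvSetPixel g (cx - 10) 9 k
  let g := pvSetPixel g (cx - 10) 10 k
  let g := pvSetPixel g (cx - 10) 11 k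
  let g := pvSetPixel g (cx + 10) 7 k
  let g := pvSetPixel g (cx + 10) 8 k
  let g := pvSetPixel g (cx + 10) 9 k
  let g := pvSetPixel g (cx + 10) 10 k
  let g := pvSetPixel g (cx + 10) 11 k
  -- Base outline
  let g := pvDrawLineH g (cx - 7) 26 15 k
  g

def gen_trophy (body_dark : Int × Int × Int × Int) (body_mid : Int × Int × Int × Int) (body_light : Int × Int × Int × Int) (accent : Int × Int × Int × Int) : List (List (Int × Int × Int × Int)) :=
  pvTrophyA pvTransparent pvKColor body_dark body_mid body_light accent

-- ===== PORT B =====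
def pvTrophyTemplate : List String := [
  "................................",
  "................................",
  ".......KKKKKKKKKKKKKKKKK........",
  ".......KMMMMMMMMMMMMMMMK........",
  ".......KLLLLLLLLLLLLLLLK........",
  ".......KLLLLLLLLLLLLLLLK........",
  ".......D.MLMMMMMMMMMMM.D........",
  ".....KDD.MLMMMMMMMMMMM.DDK......",
  ".....KDD.MLMMMMMMMMMMM.DDK......",
  ".....KDD..MLMMMAMMMMM..DDK......",
  ".....KDD..MLMMAMAMMMM..DDK......",
  ".....KDD..MLMMMAMMMMM..DDK......",
  "...........MLMMMMMMM............",
  "...........MLMMMMMMM............",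
  "...........MLMMMMMMM............",
  "............MLMMMMM.............",
  "............MMMMMMM.............",
  "............MMMMMMM.............",
  "..............DMD...............",
  "..............DMD...............",
  "..............DDD...............",
  "..............DDD...............",
  "..........MMMMMMMMMMM...........",
  "..........DDDDDDDDDDD...........",
  ".........MMMMMMMMMMMMM..........",
  ".........DDDDDDDDDDDDD..........",
  "........KKKKKKKKKKKKKKK.........",
  "................................",
  "................................",
  "................................",
  "................................",
  "................................"]

-- Source B's palette dict, as a match over its five keys ('.' is the default)
def pvPalette {α : Type} (t k d m l a : α) (ch : Char) : α :=
  if ch = 'D' then d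
  else if ch = 'M' then m
  else if ch = 'L' then l
  else if ch = 'A' then a
  else if ch = 'K' then k
  else t

def pvTrophyB {α : Type} (t k d m l a : α) : List (List α) :=
  pvTrophyTemplate.map (fun row => row.toList.map (pvPalette t k d m l a))

def gen_trophy_alt (body_dark : Int × Int × Int × Int) (body_mid : Int × Int × Int × Int) (body_light : Int × Int × Int × Int) (accent : Int × Int × Int × Int) : List (List (Int × Int × Int × Int)) :=
  pvTrophyB pvTransparent pvKColor body_dark body_mid body_light accent

-- ===== PRECONDITION & SPEC =====
def Spec_gen_trophy (body_dark : Int × Int × Int × Int) (body_mid : Int × Int × Int × Int) (body_light : Int × Int × Int × Int) (accent : Int × Int × Int × Int) (out : List (List (Int × Int × Int × Int))) : Prop := out = gen_trophy_alt body_dark body_mid body_light accent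
instance (body_dark : Int × Int × Int × Int) (body_mid : Int × Int × Int × Int) (body_light : Int × Int × Int × Int) (accent : Int × Int × Int × Int) (out : List (List (Int × Int × Int × Int))) : Decidable (Spec_gen_trophy body_dark body_mid body_light accent out) := by unfold Spec_gen_trophy; infer_instance

-- ===== CLAIM (what is proved, stated in full; the proofs are below) =====
def Claim_equal_gen_trophy : Prop := ∀ (body_dark : Int × Int × Int × Int) (body_mid : Int × Int × Int × Int) (body_light : Int × Int × Int × Int) (accent : Int × Int × Int × Int), Dom_gen_trophy body_dark body_mid body_light accent → Spec_gen_trophy body_dark body_mid body_light accent (gen_trophy body_dark body_mid body_light accent)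

-- ===== LEMMAS AND PROOFS =====

-- Both ports only MOVE colours around, so we prove them equal once over a six-element tag type
-- (by decide) and transport the result to arbitrary colours by naturality in the colour type.

inductive PvTag : Type
  | t | k | d | m | l | a
deriving DecidableEq, Repr

def pvMapGrid {α β : Type} (f : α → β) (g : List (List α)) : List (List β) :=
  g.map (List.map f)

theorem pvMapGrid_length {α β : Type} (f : α → β) (g : List (List α)) :
    (pvMapGrid f g).length = g.length := by simp [pvMapGrid]

theorem pvMapGrid_headD_length {α β : Type} (f : α → β) (g : List (List α)) :
    ((pvMapGrid f g).headD []).length = (g.headD []).length := by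
  cases g <;> simp [pvMapGrid]

theorem pvMap_modify {α β : Type} (f : α → β) (l : List α) (i : Nat) (g : α → α) (g' : β → β)
    (h : ∀ x, f (g x) = g' (f x)) : (l.modify i g).map f = (l.map f).modify i g' := by
  apply List.ext_getElem?
  intro j
  simp only [List.getElem?_map, List.getElem?_modify]
  cases l[j]? <;> simp only [Option.map_none, Option.map_some] <;> split <;> simp [h]

theorem pvAssign_nat {α β : Type} (f : α → β) (g : List (List α)) (x y : Int) (c : α) :
    pvAssign (pvMapGrid f g) x y (f c) = pvMapGrid f (pvAssign g x y c) := by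
  unfold pvAssign pvMapGrid
  exact (pvMap_modify (List.map f) g y.toNat (fun row => row.set x.toNat c)
    (fun row => row.set x.toNat (f c)) (fun _ => List.map_set)).symm

theorem pvSetPixel_nat {α β : Type} (f : α → β) (g : List (List α)) (x y : Int) (c : α) :
    pvSetPixel (pvMapGrid f g) x y (f c) = pvMapGrid f (pvSetPixel g x y c) := by
  unfold pvSetPixel
  rw [pvMapGrid_length, pvMapGrid_headD_length]
  split
  · exact pvAssign_nat f g x y c
  · rfl

theorem pvDrawRect_nat {α β : Type} (f : α → β) (g : List (List α)) (x y w h : Int) (c : α) :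
    pvDrawRect (pvMapGrid f g) x y w h (f c) = pvMapGrid f (pvDrawRect g x y w h c) := by
  unfold pvDrawRect
  rw [pvMapGrid_length]
  refine List.foldl_hom (pvMapGrid f) ?_
  intro g ry
  rw [pvMapGrid_headD_length]
  refine List.foldl_hom (pvMapGrid f) ?_
  intro g rx
  exact pvAssign_nat f g rx ry c

theorem pvDrawLineH_nat {α β : Type} (f : α → β) (g : List (List α)) (x y len_ : Int) (c : α) :
    pvDrawLineH (pvMapGrid f g) x y len_ (f c) = pvMapGrid f (pvDrawLineH g x y len_ c) := by
  unfold pvDrawLineH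
  refine List.foldl_hom (pvMapGrid f) ?_
  intro g i
  exact pvSetPixel_nat f g (x + i) y c

theorem pvBlank_nat {α β : Type} (f : α → β) (w h : Int) (fill : α) :
    pvBlank w h (f fill) = pvMapGrid f (pvBlank w h fill) := by
  simp [pvBlank, pvMapGrid]

theorem pvCupBody_nat {α β : Type} (f : α → β) (cx : Int) (c : α) (g : List (List α)) :
    pvCupBody cx (f c) (pvMapGrid f g) = pvMapGrid f (pvCupBody cx c g) := by
  unfold pvCupBody
  refine List.foldl_hom (pvMapGrid f) ?_
  intro g dy
  simp only
  split <;> exact pvDrawLineH_nat f g _ _ _ c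

theorem pvHighlights_nat {α β : Type} (f : α → β) (cx : Int) (c : α) (g : List (List α)) :
    pvHighlights cx (f c) (pvMapGrid f g) = pvMapGrid f (pvHighlights cx c g) := by
  unfold pvHighlights
  refine List.foldl_hom (pvMapGrid f) ?_
  intro g dy
  exact pvSetPixel_nat f g _ _ c

theorem pvHandles_nat {α β : Type} (f : α → β) (cx : Int) (c : α) (g : List (List α)) :
    pvHandles cx (f c) (pvMapGrid f g) = pvMapGrid f (pvHandles cx c g) := by
  unfold pvHandles
  refine List.foldl_hom (pvMapGrid f) ?_
  intro g dy
  simp only [pvSetPixel_nat f]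

theorem pvTrophyA_nat {α β : Type} (f : α → β) (t k d m l a : α) :
    pvTrophyA (f t) (f k) (f d) (f m) (f l) (f a) = pvMapGrid f (pvTrophyA t k d m l a) := by
  unfold pvTrophyA
  simp only [pvBlank_nat f, pvDrawRect_nat f, pvDrawLineH_nat f, pvCupBody_nat f,
    pvHighlights_nat f, pvHandles_nat f, pvSetPixel_nat f]

theorem pvPalette_nat {α β : Type} (f : α → β) (t k d m l a : α) (ch : Char) :
    pvPalette (f t) (f k) (f d) (f m) (f l) (f a) ch = f (pvPalette t k d m l a ch) := by
  unfold pvPalette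
  split_ifs <;> rfl

theorem pvTrophyB_nat {α β : Type} (f : α → β) (t k d m l a : α) :
    pvTrophyB (f t) (f k) (f d) (f m) (f l) (f a) = pvMapGrid f (pvTrophyB t k d m l a) := by
  simp [pvTrophyB, pvMapGrid, List.map_map, Function.comp_def, pvPalette_nat f]

-- the one finite computation: the two drawings coincide over tags
set_option maxRecDepth 10000 in
set_option maxHeartbeats 1000000 in
theorem pvTag_eq :
    pvTrophyA PvTag.t PvTag.k PvTag.d PvTag.m PvTag.l PvTag.a
      = pvTrophyB PvTag.t PvTag.k PvTag.d PvTag.m PvTag.l PvTag.a := by decide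

def pvInterp (bd bm bl ac : Int × Int × Int × Int) : PvTag → Int × Int × Int × Int
  | PvTag.t => pvTransparent
  | PvTag.k => pvKColor
  | PvTag.d => bd
  | PvTag.m => bm
  | PvTag.l => bl
  | PvTag.a => ac

-- ===== VERDICT (by name: the statement is the Claim_ definition above) =====
theorem gen_trophy_spec : Claim_equal_gen_trophy := by
  intro bd bm bl ac _
  show gen_trophy bd bm bl ac = gen_trophy_alt bd bm bl ac
  unfold gen_trophy gen_trophy_alt
  calc pvTrophyA pvTransparent pvKColor bd bm bl ac
      = pvMapGrid (pvInterp bd bm bl ac) (pvTrophyA PvTag.t PvTag.k PvTag.d PvTag.m PvTag.l PvTag.a) :=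
        pvTrophyA_nat (pvInterp bd bm bl ac) PvTag.t PvTag.k PvTag.d PvTag.m PvTag.l PvTag.a
    _ = pvMapGrid (pvInterp bd bm bl ac) (pvTrophyB PvTag.t PvTag.k PvTag.d PvTag.m PvTag.l PvTag.a) := by
        rw [pvTag_eq]
    _ = pvTrophyB pvTransparent pvKColor bd bm bl ac :=
        (pvTrophyB_nat (pvInterp bd bm bl ac) PvTag.t PvTag.k PvTag.d PvTag.m PvTag.l PvTag.a).symm
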